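-- pv_equiv track=rewrite | github.com/HaoxinLuo/prefpy | prefpy/mechanismSTV.py | getWinLoseCandidates
-- ===== SOURCE A (Python) =====
-- def getWinLoseCandidates(candScoreMap, winningQuota):
--     """
--     Returns candidates who gained at least winningQuota worth of votes and
--     those with the least positive number of votes.
--
--     :rtype set<int> winners: The set of candidates who has winningQuota worth
--         of votes this round.
--     :rtype set<int> losers: The set of candidates who has the least positive
--         amount of votes.
--
--     :ivar dict<int, int> candScoremap: A mapping of candidates to their score.
--     :ivar int winningQuota: the amount of votes needed to win a seat
--     """
--     winners, losers = set(), set()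
--     lowestScore = winningQuota
--     for cand,score in candScoreMap.items():
--         if score >= winningQuota:
--             winners.add(cand)
--         elif score < lowestScore and score != 0:
--             lowestScore = score
--             losers = set([cand])
--         elif score == lowestScore:
--             losers.add(cand)
--     return winners, losers
-- ===== SOURCE B (Python) =====
-- def getWinLoseCandidates(candScoreMap, winningQuota):
--     winners, contenders = set(), []
--     for cand, score in candScoreMap.items():
--         if score >= winningQuota:
--             winners.add(cand)
--         elif score != 0:
--             contenders.append((cand, score))
--     losers = set()
--     if contenders:
--         m = min(score for _, score in contenders)
--         losers = {cand for cand, score in contenders if score == m}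
--     return winners, losers
-- ===== Notes on version B (the rewrite author's own statement) =====
-- stated objective: simpler
-- what changed: Replaces A's running-minimum-with-reset-on-new-low accumulation by collecting non-winner nonzero-score contenders, then taking one global min and filtering the ties.
import Mathlib
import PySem

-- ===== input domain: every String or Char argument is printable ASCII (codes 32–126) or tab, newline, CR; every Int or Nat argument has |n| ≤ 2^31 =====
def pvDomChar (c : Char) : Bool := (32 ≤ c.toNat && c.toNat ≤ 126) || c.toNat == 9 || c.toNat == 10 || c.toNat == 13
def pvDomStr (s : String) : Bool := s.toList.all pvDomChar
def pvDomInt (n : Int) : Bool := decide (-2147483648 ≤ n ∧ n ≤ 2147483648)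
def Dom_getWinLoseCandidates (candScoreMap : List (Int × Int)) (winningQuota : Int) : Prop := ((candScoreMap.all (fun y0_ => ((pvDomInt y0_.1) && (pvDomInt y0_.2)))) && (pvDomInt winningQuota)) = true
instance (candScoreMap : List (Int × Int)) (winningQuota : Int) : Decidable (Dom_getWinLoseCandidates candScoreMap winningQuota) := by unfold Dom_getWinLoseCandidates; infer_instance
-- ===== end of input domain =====

-- B replaces A's running-minimum-with-reset accumulation by collect contenders, then one global min and a filter (simpler decomposition).

-- ===== PORT A =====
def getWinLoseCandidates (candScoreMap : List (Int × Int)) (winningQuota : Int) : List Int × List Int :=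
  let st := candScoreMap.foldl (fun (st : List Int × List Int × Int) p =>
    if p.2 ≥ winningQuota then (PySem.Set.add st.1 p.1, st.2.1, st.2.2)
    else if p.2 < st.2.2 ∧ p.2 ≠ 0 then (st.1, [p.1], p.2)
    else if p.2 = st.2.2 then (st.1, PySem.Set.add st.2.1 p.1, st.2.2)
    else st) ([], [], winningQuota)
  (st.1, st.2.1)

-- ===== PORT B =====
def getWinLoseCandidates_alt (candScoreMap : List (Int × Int)) (winningQuota : Int) : List Int × List Int :=
  let wc := candScoreMap.foldl (fun (acc : List Int × List (Int × Int)) p =>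
    if p.2 ≥ winningQuota then (PySem.Set.add acc.1 p.1, acc.2)
    else if p.2 ≠ 0 then (acc.1, acc.2 ++ [p])
    else acc) ([], [])
  let losers : List Int :=
    match PySem.List.min? (wc.2.map (·.2)) (fun x => x) with
    | none => []
    | some m => PySem.Set.ofList ((wc.2.filter (fun p => p.2 == m)).map (·.1))
  (wc.1, losers)

-- ===== PRECONDITION & SPEC =====
def Spec_getWinLoseCandidates (candScoreMap : List (Int × Int)) (winningQuota : Int) (out : List Int × List Int) : Prop := out = getWinLoseCandidates_alt candScoreMap winningQuota
instance (candScoreMap : List (Int × Int)) (winningQuota : Int) (out : List Int × List Int) : Decidable (Spec_getWinLoseCandidates candScoreMap winningQuota out) := by unfold Spec_getWinLoseCandidates; infer_instance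

-- ===== CLAIM (what is proved, stated in full; the proofs are below) =====
def Claim_equal_getWinLoseCandidates : Prop := ∀ (candScoreMap : List (Int × Int)) (winningQuota : Int), Dom_getWinLoseCandidates candScoreMap winningQuota → Spec_getWinLoseCandidates candScoreMap winningQuota (getWinLoseCandidates candScoreMap winningQuota)

-- ===== LEMMAS AND PROOFS =====

-- the running minimum A maintains, computed from the contender list B collects
def mOf (q : Int) (cs : List (Int × Int)) : Int := cs.foldl (fun a p => min a p.2) q

-- the loser set A maintains, computed from the contender list B collects
def losersOf (q : Int) (cs : List (Int × Int)) : List Int :=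
  PySem.Set.ofList ((cs.filter (fun p => p.2 == mOf q cs)).map (·.1))

theorem mOf_le (q : Int) (cs : List (Int × Int)) : mOf q cs ≤ q ∧ ∀ p ∈ cs, mOf q cs ≤ p.2 := by
  induction cs generalizing q with
  | nil => simp [mOf]
  | cons c t ih =>
    have h := ih (min q c.2)
    refine ⟨le_trans h.1 (min_le_left _ _), ?_⟩
    intro p hp
    rcases List.mem_cons.mp hp with rfl | hp
    · exact le_trans h.1 (min_le_right _ _)
    · exact h.2 p hp

theorem mOf_mem (q : Int) (cs : List (Int × Int)) : mOf q cs = q ∨ ∃ p ∈ cs, mOf q cs = p.2 := by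
  induction cs generalizing q with
  | nil => simp [mOf]
  | cons c t ih =>
    rcases ih (min q c.2) with h | ⟨p, hp, h⟩
    · rcases min_cases q c.2 with ⟨he, _⟩ | ⟨he, _⟩
      · left; simpa [mOf, he] using h
      · right; exact ⟨c, List.mem_cons_self, by simpa [mOf, he] using h⟩
    · right; exact ⟨p, List.mem_cons_of_mem _ hp, by simpa [mOf] using h⟩

theorem mOf_append (q : Int) (cs : List (Int × Int)) (p : Int × Int) :
    mOf q (cs ++ [p]) = min (mOf q cs) p.2 := by
  simp [mOf, List.foldl_append]

-- every pair B's first loop accumulates is a true contender: score below quota and nonzero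
theorem contenders_ok (q : Int) (xs : List (Int × Int)) (acc : List Int × List (Int × Int))
    (h : ∀ p ∈ acc.2, p.2 < q ∧ p.2 ≠ 0) :
    ∀ p ∈ (xs.foldl (fun (acc : List Int × List (Int × Int)) p =>
      if p.2 ≥ q then (PySem.Set.add acc.1 p.1, acc.2)
      else if p.2 ≠ 0 then (acc.1, acc.2 ++ [p])
      else acc) acc).2, p.2 < q ∧ p.2 ≠ 0 := by
  induction xs generalizing acc with
  | nil => simpa using h
  | cons x t ih =>
    rw [List.foldl_cons]
    by_cases hw : x.2 ≥ q
    · rw [if_pos hw]; exact ih _ h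
    · rw [if_neg hw]
      by_cases hz : x.2 = 0
      · rw [if_neg (by simp [hz])]; exact ih _ h
      · rw [if_pos hz]
        refine ih _ ?_
        intro p hp
        rcases List.mem_append.mp hp with hp | hp
        · exact h p hp
        · simp at hp; subst hp; exact ⟨by omega, hz⟩

-- main invariant: A's fold over the remaining list, started from the state encoded by
-- B's accumulated (winners, contenders), lands in the state encoded by B's final accumulator
theorem invariant (q : Int) (xs : List (Int × Int)) (W : List Int) (cs : List (Int × Int))
    (hcs : ∀ p ∈ cs, p.2 < q ∧ p.2 ≠ 0) :
    xs.foldl (fun (st : List Int × List Int × Int) p =>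
      if p.2 ≥ q then (PySem.Set.add st.1 p.1, st.2.1, st.2.2)
      else if p.2 < st.2.2 ∧ p.2 ≠ 0 then (st.1, [p.1], p.2)
      else if p.2 = st.2.2 then (st.1, PySem.Set.add st.2.1 p.1, st.2.2)
      else st) (W, losersOf q cs, mOf q cs)
    = ((xs.foldl (fun (acc : List Int × List (Int × Int)) p =>
        if p.2 ≥ q then (PySem.Set.add acc.1 p.1, acc.2)
        else if p.2 ≠ 0 then (acc.1, acc.2 ++ [p])
        else acc) (W, cs)).1,
       losersOf q (xs.foldl (fun (acc : List Int × List (Int × Int)) p =>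
        if p.2 ≥ q then (PySem.Set.add acc.1 p.1, acc.2)
        else if p.2 ≠ 0 then (acc.1, acc.2 ++ [p])
        else acc) (W, cs)).2,
       mOf q (xs.foldl (fun (acc : List Int × List (Int × Int)) p =>
        if p.2 ≥ q then (PySem.Set.add acc.1 p.1, acc.2)
        else if p.2 ≠ 0 then (acc.1, acc.2 ++ [p])
        else acc) (W, cs)).2) := by
  induction xs generalizing W cs with
  | nil => simp
  | cons x t ih =>
    rw [List.foldl_cons, List.foldl_cons]
    by_cases hw : x.2 ≥ q
    · rw [if_pos hw]
      simp only [if_pos hw]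
      exact ih (PySem.Set.add W x.1) cs hcs
    · rw [if_neg hw]
      simp only [if_neg hw]
      by_cases hz : x.2 = 0
      · -- score 0: A's remaining branches cannot fire since the running min is never 0 here
        have hm0 : mOf q cs ≠ 0 := by
          rcases mOf_mem q cs with h | ⟨p, hp, h⟩
          · rw [h]; intro hq0; rw [hq0] at hw; omega
          · rw [h]; exact (hcs p hp).2
        rw [if_neg (by simp [hz]), if_neg (by rw [hz]; exact fun h => hm0 h.symm),
            if_neg (by simp [hz])]
        exact ih W cs hcs
      · -- genuine contender: B appends it; A updates its running min / loser set
        have hcs' : ∀ p ∈ cs ++ [x], p.2 < q ∧ p.2 ≠ 0 := by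
          intro p hp
          rcases List.mem_append.mp hp with h | h
          · exact hcs p h
          · simp at h; subst h; exact ⟨by omega, hz⟩
        have key : (if x.2 < mOf q cs ∧ x.2 ≠ 0 then ((W : List Int), ([x.1] : List Int), x.2)
            else if x.2 = mOf q cs then (W, PySem.Set.add (losersOf q cs) x.1, mOf q cs)
            else (W, losersOf q cs, mOf q cs))
            = (W, losersOf q (cs ++ [x]), mOf q (cs ++ [x])) := by
          rcases lt_trichotomy x.2 (mOf q cs) with hlt | heq | hgt
          · have hmin : min (mOf q cs) x.2 = x.2 := min_eq_right hlt.le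
            have hfil : cs.filter (fun p => p.2 == x.2) = [] := by
              apply List.filter_eq_nil_iff.mpr
              intro p hp
              have := (mOf_le q cs).2 p hp
              simp; omega
            rw [if_pos ⟨hlt, hz⟩]
            simp [losersOf, mOf_append, hmin, List.filter_append, hfil, PySem.Set.ofList]
          · have hmin : min (mOf q cs) x.2 = mOf q cs := min_eq_left heq.ge
            rw [if_neg (by rintro ⟨h, _⟩; omega), if_pos heq]
            simp [losersOf, mOf_append, List.filter_append, heq,
              PySem.Set.ofList, List.foldl_append]
          · have hmin : min (mOf q cs) x.2 = mOf q cs := min_eq_left hgt.le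
            have h2 : x.2 ≠ mOf q cs := by omega
            have hfil : List.filter (fun p => p.2 == mOf q cs) [x] = [] := by simp [h2]
            rw [if_neg (by rintro ⟨h, _⟩; omega), if_neg h2]
            simp [losersOf, mOf_append, hmin, List.filter_append, hfil]
        rw [if_pos hz, key]
        exact ih W (cs ++ [x]) hcs'

-- B's post-processing (min of the contender scores, then filter) computes exactly losersOf
theorem post_eq (q : Int) (cs : List (Int × Int)) (hcs : ∀ p ∈ cs, p.2 < q ∧ p.2 ≠ 0) :
    (match PySem.List.min? (cs.map (·.2)) (fun x => x) with
     | none => ([] : List Int)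
     | some m => PySem.Set.ofList ((cs.filter (fun p => p.2 == m)).map (·.1)))
    = losersOf q cs := by
  cases cs with
  | nil => simp [losersOf, PySem.Set.ofList, PySem.List.min?]
  | cons c t =>
    have hmin : PySem.List.min? ((c :: t).map (·.2)) (fun x => x)
        = some ((t.map (·.2)).foldl min c.2) := by
      simp [PySem.List.min?_id_cons]
    have hfold : (t.map (·.2)).foldl min c.2 = mOf q (c :: t) := by
      have hc : min q c.2 = c.2 := min_eq_right (hcs c List.mem_cons_self).1.le
      simp [mOf, List.foldl_map, hc]
    rw [hmin]
    simp [hfold, losersOf]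

-- ===== VERDICT (by name: the statement is the Claim_ definition above) =====
theorem getWinLoseCandidates_spec : Claim_equal_getWinLoseCandidates := by
  intro m q _
  unfold Spec_getWinLoseCandidates getWinLoseCandidates getWinLoseCandidates_alt
  have h0 : losersOf q [] = [] := by simp [losersOf, PySem.Set.ofList]
  have hm0 : mOf q [] = q := by simp [mOf]
  have hinv := invariant q m [] [] (by simp)
  rw [h0, hm0] at hinv
  have hcs := contenders_ok q m ([], []) (by simp)
  simp only [hinv]
  rw [post_eq q _ hcs]
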